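-- pv_equiv track=rewrite | github.com/ksomemo/Competitive-programming | atcoder/abc/104/D.py | editorial
-- ===== SOURCE A (Python) =====
-- def editorial(S):
--     MOD = 10 ** 9 + 7
--     n = len(S)
--     dp = [[0] * (3+1) for _ in range(n+1)]
--
--     for i in range(n, -1, -1):
--         for j in range(3, -1, -1):
--             if i == n:
--                 x = int(j == 3)
--                 # ≠3: 丸を3個つける前に最後の文字まで見終わってしまい、手遅れ
--                 # =3: 処理が正常終了
--                 dp[i][j] = x
--             else:
--                 m1 = 1
--                 if S[i] == "?":
--                     m1 = 3
--
--                 if j == 3: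
--                     # 丸は3個つけ終わったので、あとは?を置換するのみ
--                     dp[i][j] = m1 * dp[i+1][j]
--                 else:
--                     m2 = int(S[i] == "?" or S[i] == "ABC"[j])
--                     # 前半:i文字目に丸をつけない場合, 後半:丸をつける場合に対応
--                     dp[i][j] = m1 * dp[i+1][j] + m2 * dp[i+1][j+1]
--
--                 dp[i][j] %= MOD
--
--     ans = dp[0][0]
--     return ans
-- ===== SOURCE B (Python) =====
-- def editorial(S):
--     MOD = 10 ** 9 + 7
--     e, a, ab, abc = 1, 0, 0, 0
--     for c in S:
--         if c == "?":
--             e, a, ab, abc = 3 * e % MOD, (3 * a + e) % MOD, (3 * ab + a) % MOD, (3 * abc + ab) % MOD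
--         elif c == "A":
--             a = (a + e) % MOD
--         elif c == "B":
--             ab = (ab + a) % MOD
--         elif c == "C":
--             abc = (abc + ab) % MOD
--     return abc
-- ===== Notes on version B (the rewrite author's own statement) =====
-- stated objective: faster
-- what changed: Replaced the backward (n+1)x4 DP table filled right-to-left with a single forward left-to-right pass over four scalar counters (ways to have matched '', 'A', 'AB', 'ABC'), allocating no table.
import Mathlib
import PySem

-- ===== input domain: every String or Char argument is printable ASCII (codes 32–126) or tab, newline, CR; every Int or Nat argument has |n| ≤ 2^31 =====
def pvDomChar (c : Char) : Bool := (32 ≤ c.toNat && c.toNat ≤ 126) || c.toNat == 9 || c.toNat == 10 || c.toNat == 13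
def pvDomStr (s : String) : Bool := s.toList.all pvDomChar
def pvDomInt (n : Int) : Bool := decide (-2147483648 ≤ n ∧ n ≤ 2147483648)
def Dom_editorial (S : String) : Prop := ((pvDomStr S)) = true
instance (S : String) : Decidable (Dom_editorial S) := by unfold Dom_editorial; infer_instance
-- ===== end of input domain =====

-- B replaces A's backward-filled (n+1)×4 DP table by a forward pass over four scalar counters; return values proved equal.

-- ===== PORT A =====
-- A fills row i of its table from row i+1 (inner loop j = 3,2,1,0); ported as one row step
-- applied by foldr over the characters, base row = dp[n] = (0,0,0,1) (the i = n branch).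
def pvMOD : Int := 10 ^ 9 + 7

def pvRowA (c : Char) (d : Int × Int × Int × Int) : Int × Int × Int × Int :=
  let m1 : Int := if c = '?' then 3 else 1
  -- j = 3
  let d3 := (m1 * d.2.2.2) % pvMOD
  -- j = 2 ("ABC"[2] = 'C')
  let d2 := (m1 * d.2.2.1 + (if c = '?' ∨ c = 'C' then (1:Int) else 0) * d.2.2.2) % pvMOD
  -- j = 1
  let d1 := (m1 * d.2.1 + (if c = '?' ∨ c = 'B' then (1:Int) else 0) * d.2.2.1) % pvMOD
  -- j = 0
  let d0 := (m1 * d.1 + (if c = '?' ∨ c = 'A' then (1:Int) else 0) * d.2.1) % pvMOD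
  (d0, d1, d2, d3)

def editorial (S : String) : Int :=
  (S.toList.foldr pvRowA (0, 0, 0, 1)).1

-- ===== PORT B =====
def pvStepB (s : Int × Int × Int × Int) (c : Char) : Int × Int × Int × Int :=
  let (e, a, ab, abc) := s
  if c = '?' then
    (3 * e % pvMOD, (3 * a + e) % pvMOD, (3 * ab + a) % pvMOD, (3 * abc + ab) % pvMOD)
  else if c = 'A' then (e, (a + e) % pvMOD, ab, abc)
  else if c = 'B' then (e, a, (ab + a) % pvMOD, abc)
  else if c = 'C' then (e, a, ab, (abc + ab) % pvMOD)
  else (e, a, ab, abc)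

def editorial_alt (S : String) : Int :=
  (S.toList.foldl pvStepB (1, 0, 0, 0)).2.2.2

-- ===== PRECONDITION & SPEC =====
def Spec_editorial (S : String) (out : Int) : Prop := out = editorial_alt S
instance (S : String) (out : Int) : Decidable (Spec_editorial S out) := by unfold Spec_editorial; infer_instance

-- ===== CLAIM (what is proved, stated in full; the proofs are below) =====
def Claim_equal_editorial : Prop := ∀ (S : String), Dom_editorial S → Spec_editorial S (editorial S)

-- ===== LEMMAS AND PROOFS =====

-- dot product of a forward state with a backward row
def pvDot (s d : Int × Int × Int × Int) : Int :=
  s.1 * d.1 + s.2.1 * d.2.1 + s.2.2.1 * d.2.2.1 + s.2.2.2 * d.2.2.2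

lemma pvMOD_pos : (0:Int) < pvMOD := by decide

-- equality mod pvMOD via ZMod
lemma pv_zmod {X Y : Int} (h : (X : ZMod 1000000007) = (Y : ZMod 1000000007)) :
    X % pvMOD = Y % pvMOD := by
  have h2 := (ZMod.intCast_eq_intCast_iff X Y 1000000007).mp h
  simpa [pvMOD, Int.ModEq] using h2

lemma pv_cast_mod (a : Int) : ((a % pvMOD : Int) : ZMod 1000000007) = (a : ZMod 1000000007) := by
  have hm : pvMOD = ((1000000007 : Nat) : Int) := by norm_num [pvMOD]
  rw [hm]; exact ZMod.intCast_mod a 1000000007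

-- entries of A's rows lie in [0, pvMOD)
def pvInRange (d : Int × Int × Int × Int) : Prop :=
  0 ≤ d.1 ∧ d.1 < pvMOD ∧ 0 ≤ d.2.1 ∧ d.2.1 < pvMOD ∧
  0 ≤ d.2.2.1 ∧ d.2.2.1 < pvMOD ∧ 0 ≤ d.2.2.2 ∧ d.2.2.2 < pvMOD

lemma pvRowA_inRange (c : Char) (d : Int × Int × Int × Int) : pvInRange (pvRowA c d) := by
  unfold pvInRange pvRowA
  refine ⟨?_, ?_, ?_, ?_, ?_, ?_, ?_, ?_⟩ <;>
    first
      | exact Int.emod_nonneg _ (by decide)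
      | exact Int.emod_lt_of_pos _ pvMOD_pos

lemma pvFoldrA_inRange (l : List Char) : pvInRange (l.foldr pvRowA (0, 0, 0, 1)) := by
  cases l with
  | nil => exact ⟨by decide, by decide, by decide, by decide,
      by decide, by decide, by decide, by decide⟩
  | cons c t => exact pvRowA_inRange c _

-- B's completed counter stays in [0, pvMOD)
lemma pvStepB_abc (s : Int × Int × Int × Int) (c : Char)
    (h : 0 ≤ s.2.2.2 ∧ s.2.2.2 < pvMOD) :
    0 ≤ (pvStepB s c).2.2.2 ∧ (pvStepB s c).2.2.2 < pvMOD := by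
  obtain ⟨e, a, ab, abc⟩ := s
  unfold pvStepB
  split_ifs <;>
    first
      | exact ⟨Int.emod_nonneg _ (by decide), Int.emod_lt_of_pos _ pvMOD_pos⟩
      | exact h

lemma pvFoldlB_abc (l : List Char) (s : Int × Int × Int × Int)
    (h : 0 ≤ s.2.2.2 ∧ s.2.2.2 < pvMOD) :
    0 ≤ (l.foldl pvStepB s).2.2.2 ∧ (l.foldl pvStepB s).2.2.2 < pvMOD := by
  induction l generalizing s with
  | nil => exact h
  | cons c t ih => exact ih (pvStepB s c) (pvStepB_abc s c h)

-- one step: pairing the forward state with A's row step equals stepping the state forward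
lemma pvStep_dot (c : Char) (s d : Int × Int × Int × Int) :
    pvDot s (pvRowA c d) % pvMOD = pvDot (pvStepB s c) d % pvMOD := by
  obtain ⟨e, a, ab, abc⟩ := s
  obtain ⟨x, y, z, w⟩ := d
  unfold pvDot pvRowA pvStepB
  by_cases hq : c = '?'
  · simp only [hq, true_or, if_true]
    apply pv_zmod; push_cast [pv_cast_mod]
    ring
  · by_cases hA : c = 'A'
    · simp only [hA, show ('A' = '?') = False by simp, show ('A' = 'C') = False by simp,
        show ('A' = 'B') = False by simp, or_true, or_false,
        if_true, if_false]
      apply pv_zmod; push_cast [pv_cast_mod]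
      ring
    · by_cases hB : c = 'B'
      · simp only [hB, show ('B' = '?') = False by simp,
          show ('B' = 'C') = False by simp, show ('B' = 'A') = False by simp,
          or_true, or_false, if_true, if_false]
        apply pv_zmod; push_cast [pv_cast_mod]
        ring
      · by_cases hC : c = 'C'
        · simp only [hC, show ('C' = '?') = False by simp,
            show ('C' = 'B') = False by simp, show ('C' = 'A') = False by simp,
            or_true, or_false, if_true, if_false]
          apply pv_zmod; push_cast [pv_cast_mod]
          ring
        · simp only [hq, hA, hB, hC, or_false, if_false]
          apply pv_zmod; push_cast [pv_cast_mod]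
          ring

-- main invariant: the dot of the forward state with A's suffix row is B's final counter (mod p)
lemma pvMain (l : List Char) (s : Int × Int × Int × Int) :
    pvDot s (l.foldr pvRowA (0, 0, 0, 1)) % pvMOD = (l.foldl pvStepB s).2.2.2 % pvMOD := by
  induction l generalizing s with
  | nil => unfold pvDot; simp
  | cons c t ih =>
    rw [List.foldr_cons, List.foldl_cons, pvStep_dot c s _, ih (pvStepB s c)]

-- ===== VERDICT (by name: the statement is the Claim_ definition above) =====
theorem editorial_spec : Claim_equal_editorial := by
  intro S _
  unfold Spec_editorial editorial editorial_alt
  have hmain := pvMain S.toList (1, 0, 0, 0)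
  have hdot : pvDot (1, 0, 0, 0) (S.toList.foldr pvRowA (0, 0, 0, 1))
      = (S.toList.foldr pvRowA (0, 0, 0, 1)).1 := by unfold pvDot; ring
  have hb := pvFoldrA_inRange S.toList
  have hf := pvFoldlB_abc S.toList (1, 0, 0, 0) ⟨by decide, by decide⟩
  rw [hdot, Int.emod_eq_of_lt hb.1 hb.2.1, Int.emod_eq_of_lt hf.1 hf.2] at hmain
  exact hmain
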